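-- pv_equiv track=rewrite | github.com/vladimirr9/programming-challenges | DailyProg#350/main.py | assembleSet
-- ===== SOURCE A (Python) =====
-- def assembleSet(N):
--     map = dict()
--     i = 1
--     while (i ** 2 <= N):
--         map[i**2] = i**2
--         i += 1
--     reversed_map = dict()
--     for i in map.values().__reversed__():
--         reversed_map[i] = i;
--     return reversed_map
-- ===== SOURCE B (Python) =====
-- def assembleSet(N):
--     # Exponential + binary search for the integer square root, then build the
--     # descending dict directly with a dict comprehension (no intermediate dict,
--     # no reversal pass).
--     if N < 1:
--         return dict()
--     hi = 1
--     while hi * hi <= N: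
--         hi *= 2
--     lo = 1
--     while hi - lo > 1:
--         mid = (lo + hi) // 2
--         if mid * mid <= N:
--             lo = mid
--         else:
--             hi = mid
--     return {j * j: j * j for j in range(lo, 0, -1)}
-- ===== Notes on version B (the rewrite author's own statement) =====
-- stated objective: alternative
-- what changed: B finds the largest integer root by exponential doubling plus binary search (O(log N) comparisons instead of A's linear square-by-square scan) and then builds the descending dict directly with one countdown comprehension, eliminating A's ascending intermediate dict and its reversed-values copy pass.
import Mathlib
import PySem

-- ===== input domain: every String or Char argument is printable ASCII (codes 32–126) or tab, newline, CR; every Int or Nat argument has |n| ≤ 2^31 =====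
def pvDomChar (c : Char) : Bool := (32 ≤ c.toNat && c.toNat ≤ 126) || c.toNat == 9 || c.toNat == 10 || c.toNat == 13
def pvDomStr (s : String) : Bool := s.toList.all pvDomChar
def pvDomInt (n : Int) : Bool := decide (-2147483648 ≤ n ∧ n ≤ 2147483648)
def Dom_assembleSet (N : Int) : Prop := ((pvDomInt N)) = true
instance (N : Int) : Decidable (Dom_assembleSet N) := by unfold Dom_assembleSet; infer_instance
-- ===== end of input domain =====

-- B finds the largest integer root by exponential doubling + binary search and
-- builds the descending dict directly in one countdown pass, instead of A's
-- linear square-by-square scan, ascending dict and reversed-values copy.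

-- Termination fact shared by the square-bounded loops: i*i ≤ N forces i ≤ N.
theorem pv_le_of_sq_le {i N : Int} (h : i * i ≤ N) : i ≤ N := by
  by_cases hi : i ≤ 0
  · have := mul_self_nonneg i; omega
  · have : i * 1 ≤ i * i := by
      apply mul_le_mul_of_nonneg_left (by omega) (by omega)
    omega

-- ===== PORT A =====
-- while i ** 2 <= N: map[i**2] = i**2; i += 1
def aLoop (N i : Int) (d : PySem.Dict Int Int) : PySem.Dict Int Int :=
  if h : i ^ 2 ≤ N then aLoop N (i + 1) (d.insert (i ^ 2) (i ^ 2)) else d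
termination_by (N + 1 - i).toNat
decreasing_by
  have : i * i ≤ N := by nlinarith [h]
  have := pv_le_of_sq_le this
  omega

def assembleSet (N : Int) : List (Int × Int) :=
  let map := aLoop N 1 PySem.Dict.empty
  let reversed_map :=
    (map.values.reverse).foldl (fun d v => d.insert v v) PySem.Dict.empty
  reversed_map.items

-- ===== PORT B =====
-- while hi * hi <= N: hi *= 2   (the '1 ≤ hi' conjunct is a totality guard
-- only: every actual call has hi ≥ 1, where it is vacuous)
def bDouble (N hi : Int) : Int :=
  if h : hi * hi ≤ N ∧ 1 ≤ hi then bDouble N (2 * hi) else hi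
termination_by (N + 1 - hi).toNat
decreasing_by
  have := pv_le_of_sq_le h.1
  omega

-- while hi - lo > 1: mid = (lo+hi)//2; if mid*mid <= N: lo = mid else hi = mid
def bBin (N lo hi : Int) : Int :=
  if h : 1 < hi - lo then
    let mid := PySem.Int.floordiv (lo + hi) 2
    if mid * mid ≤ N then bBin N mid hi else bBin N lo mid
  else lo
termination_by (hi - lo).toNat
decreasing_by
  all_goals
    have hm := PySem.Int.floordiv_eq_ediv_of_pos (a := lo + hi) (b := 2) (by norm_num)
    omega

def assembleSet_alt (N : Int) : List (Int × Int) :=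
  if N < 1 then (PySem.Dict.empty : PySem.Dict Int Int).items
  else
    let hi := bDouble N 1
    let lo := bBin N 1 hi
    ((PySem.List.pyRange lo 0 (-1)).foldl
      (fun d j => d.insert (j * j) (j * j)) PySem.Dict.empty).items

-- ===== PRECONDITION & SPEC =====
def Spec_assembleSet (N : Int) (out : List (Int × Int)) : Prop := out = assembleSet_alt N
instance (N : Int) (out : List (Int × Int)) : Decidable (Spec_assembleSet N out) := by unfold Spec_assembleSet; infer_instance

-- ===== CLAIM (what is proved, stated in full; the proofs are below) =====
def Claim_equal_assembleSet : Prop := ∀ (N : Int), Dom_assembleSet N → Spec_assembleSet N (assembleSet N)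

-- ===== LEMMAS AND PROOFS =====

-- reference root: the first i with i*i > N (A's loop counter at exit)
def bRoot (N i : Int) : Int :=
  if h : i * i ≤ N then bRoot N (i + 1) else i
termination_by (N + 1 - i).toNat
decreasing_by
  have := pv_le_of_sq_le h
  omega

theorem bRoot_of_le {N i : Int} (h : i * i ≤ N) : bRoot N i = bRoot N (i + 1) := by
  rw [bRoot]; simp [h]

theorem bRoot_of_gt {N i : Int} (h : ¬ i * i ≤ N) : bRoot N i = i := by
  rw [bRoot]; simp [h]

theorem aLoop_of_le {N i : Int} (d : PySem.Dict Int Int) (h : i ^ 2 ≤ N) :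
    aLoop N i d = aLoop N (i + 1) (d.insert (i ^ 2) (i ^ 2)) := by
  rw [aLoop]; simp [h]

theorem aLoop_of_gt {N i : Int} (d : PySem.Dict Int Int) (h : ¬ i ^ 2 ≤ N) :
    aLoop N i d = d := by
  rw [aLoop]; simp [h]

theorem pv_sq_eq (i : Int) : i ^ 2 = i * i := sq i

theorem bRoot_ge (N : Int) : ∀ (n : Nat) (i : Int), (N + 1 - i).toNat = n → i ≤ bRoot N i := by
  intro n
  induction n using Nat.strong_induction_on with
  | _ n ih =>
    intro i hn
    by_cases h : i * i ≤ N
    · have hiN := pv_le_of_sq_le h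
      rw [bRoot_of_le h]
      have := ih (N + 1 - (i + 1)).toNat (by omega) (i + 1) rfl
      omega
    · rw [bRoot_of_gt h]

theorem aLoop_eq_foldl (N : Int) :
    ∀ (n : Nat) (i : Int) (d : PySem.Dict Int Int), (N + 1 - i).toNat = n →
      aLoop N i d =
        (PySem.List.pyRange i (bRoot N i) 1).foldl
          (fun d j => d.insert (j * j) (j * j)) d := by
  intro n
  induction n using Nat.strong_induction_on with
  | _ n ih =>
    intro i d hn
    by_cases h : i * i ≤ N
    · have hiN := pv_le_of_sq_le h
      rw [aLoop_of_le d (by rw [pv_sq_eq]; exact h), bRoot_of_le h]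
      have hge : i + 1 ≤ bRoot N (i + 1) := bRoot_ge N _ (i + 1) rfl
      rw [PySem.List.pyRange_one_cons (by omega)]
      simp only [List.foldl_cons, pv_sq_eq]
      exact ih (N + 1 - (i + 1)).toNat (by omega) (i + 1) _ rfl
    · rw [aLoop_of_gt d (by rw [pv_sq_eq]; exact h), bRoot_of_gt h,
        PySem.List.pyRange_one_eq_nil (by omega)]
      rfl

-- squares are injective on positive integers
theorem pv_sq_inj {a b : Int} (ha : 1 ≤ a) (hb : 1 ≤ b) (h : a * a = b * b) : a = b := by
  nlinarith [mul_self_nonneg (a - b), mul_self_nonneg (a + b)]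

theorem pv_asc_nodup (r : Int) :
    ((PySem.List.pyRange 1 r 1).map (fun j => j * j)).Nodup := by
  apply List.Nodup.map_on
  · intro a ha b hb hab
    rw [PySem.List.mem_pyRange_one] at ha hb
    exact pv_sq_inj ha.1 hb.1 hab
  · exact PySem.List.nodup_pyRange_one 1 r

theorem pv_items_fold (l : List Int) (hnd : (l.map (fun j => j * j)).Nodup) :
    ((l.foldl (fun d j => d.insert (j * j) (j * j)) PySem.Dict.empty).items :
        List (Int × Int)) = l.map (fun j => (j * j, j * j)) := by
  have := PySem.Dict.items_foldl_insert_fresh (l := l)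
      (k := fun j => j * j) (v := fun j => j * j) (d := PySem.Dict.empty)
      (by intro a _; exact PySem.Dict.contains_empty _) hnd
  simpa using this

theorem assembleSet_eq (N : Int) :
    assembleSet N =
      ((PySem.List.pyRange 1 (bRoot N 1) 1).reverse).map (fun j => (j * j, j * j)) := by
  have hA : assembleSet N =
      (((aLoop N 1 PySem.Dict.empty).values.reverse).foldl
        (fun d v => d.insert v v) PySem.Dict.empty).items := rfl
  rw [hA]
  set r := bRoot N 1 with hr
  have hitems : (aLoop N 1 PySem.Dict.empty).items =
      (PySem.List.pyRange 1 r 1).map (fun j => (j * j, j * j)) := by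
    rw [aLoop_eq_foldl N _ 1 _ rfl]
    exact pv_items_fold _ (pv_asc_nodup r)
  have hvals : (aLoop N 1 PySem.Dict.empty).values =
      (PySem.List.pyRange 1 r 1).map (fun j => j * j) := by
    show ((aLoop N 1 PySem.Dict.empty).items).map (·.2) = _
    rw [hitems, List.map_map]; rfl
  rw [hvals]
  have hnd2 : ((((PySem.List.pyRange 1 r 1).map (fun j => j * j)).reverse).map
      (fun v : Int => v)).Nodup := by
    simp only [List.map_id']
    exact List.nodup_reverse.mpr (pv_asc_nodup r)
  have := PySem.Dict.items_foldl_insert_fresh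
      (l := ((PySem.List.pyRange 1 r 1).map (fun j => j * j)).reverse)
      (k := fun v : Int => v) (v := fun v : Int => v) (d := PySem.Dict.empty)
      (by intro a _; exact PySem.Dict.contains_empty _) hnd2
  simp only [this]
  simp [← List.map_reverse, List.map_map, PySem.Dict.empty]

-- unfolding equations for B's loops
theorem bDouble_of_le {N hi : Int} (h : hi * hi ≤ N ∧ 1 ≤ hi) :
    bDouble N hi = bDouble N (2 * hi) := by
  rw [bDouble]; simp [h]

theorem bDouble_of_gt {N hi : Int} (h : ¬ (hi * hi ≤ N ∧ 1 ≤ hi)) :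
    bDouble N hi = hi := by
  rw [bDouble]; simp only [h, dite_false]

-- the doubling loop returns an upper bound: start ≤ result, 1 ≤ result, result² > N
theorem bDouble_spec (N : Int) :
    ∀ (n : Nat) (hi : Int), (N + 1 - hi).toNat = n → 1 ≤ hi →
      hi ≤ bDouble N hi ∧ 1 ≤ bDouble N hi ∧ ¬ (bDouble N hi * bDouble N hi ≤ N) := by
  intro n
  induction n using Nat.strong_induction_on with
  | _ n ih =>
    intro hi hn h1
    by_cases h : hi * hi ≤ N
    · have hiN := pv_le_of_sq_le h
      rw [bDouble_of_le ⟨h, h1⟩]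
      have := ih (N + 1 - 2 * hi).toNat (by omega) (2 * hi) rfl (by omega)
      refine ⟨by omega, this.2.1, this.2.2⟩
    · rw [bDouble_of_gt (by tauto)]
      exact ⟨le_refl _, h1, h⟩

-- the binary search returns the floor square root given a valid bracket
theorem bBin_spec (N : Int) :
    ∀ (n : Nat) (lo hi : Int), (hi - lo).toNat = n →
      1 ≤ lo → lo < hi → lo * lo ≤ N → ¬ (hi * hi ≤ N) →
      1 ≤ bBin N lo hi ∧ bBin N lo hi * bBin N lo hi ≤ N ∧
        ¬ ((bBin N lo hi + 1) * (bBin N lo hi + 1) ≤ N) := by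
  intro n
  induction n using Nat.strong_induction_on with
  | _ n ih =>
    intro lo hi hn h1 hlt hlo hhi
    by_cases h : 1 < hi - lo
    · rw [bBin]
      simp only [h, dite_true]
      have hm := PySem.Int.floordiv_eq_ediv_of_pos (a := lo + hi) (b := 2) (by norm_num)
      set mid := PySem.Int.floordiv (lo + hi) 2 with hmid
      have hb1 : lo < mid := by omega
      have hb2 : mid < hi := by omega
      by_cases hc : mid * mid ≤ N
      · simp only [hc, if_true]
        exact ih (hi - mid).toNat (by omega) mid hi rfl (by omega) hb2 hc hhi
      · simp only [hc, if_false]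
        exact ih (mid - lo).toNat (by omega) lo mid rfl h1 hb1 hlo hc
    · rw [bBin]
      simp only [h, dite_false]
      have : hi = lo + 1 := by omega
      exact ⟨h1, hlo, by rw [← this]; exact hhi⟩

-- a bracketed root pins down A's exit counter: bRoot N 1 = m + 1
theorem bRoot_eq_of_bracket {N m : Int} (h1 : 1 ≤ m) (hlo : m * m ≤ N)
    (hhi : ¬ ((m + 1) * (m + 1) ≤ N)) : bRoot N 1 = m + 1 := by
  suffices h : ∀ (n : Nat) (i : Int), (m + 1 - i).toNat = n → 1 ≤ i → i ≤ m + 1 →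
      bRoot N i = m + 1 by
    exact h (m + 1 - 1).toNat 1 rfl (le_refl _) (by omega)
  intro n
  induction n using Nat.strong_induction_on with
  | _ n ih =>
    intro i hn hi1 him
    by_cases h : i ≤ m
    · have : i * i ≤ m * m := by nlinarith
      rw [bRoot_of_le (by omega)]
      exact ih (m + 1 - (i + 1)).toNat (by omega) (i + 1) rfl (by omega) (by omega)
    · have him' : i = m + 1 := by omega
      subst him'
      rw [bRoot_of_gt hhi]

theorem assembleSet_alt_eq (N : Int) :
    assembleSet_alt N =
      ((PySem.List.pyRange 1 (bRoot N 1) 1).reverse).map (fun j => (j * j, j * j)) := by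
  by_cases hN : N < 1
  · rw [assembleSet_alt]
    simp only [hN, if_true]
    rw [bRoot_of_gt (by nlinarith), PySem.List.pyRange_one_eq_nil (by omega)]
    rfl
  · rw [assembleSet_alt]
    simp only [hN, if_false]
    have hd := bDouble_spec N (N + 1 - 1).toNat 1 rfl (le_refl _)
    set hi := bDouble N 1 with hhi
    have hi2 : 1 < hi := by
      rcases eq_or_lt_of_le hd.1 with h | h
      · exfalso; exact hd.2.2 (by rw [← h]; omega)
      · exact h
    have hb := bBin_spec N (hi - 1).toNat 1 hi rfl (le_refl _) hi2 (by omega) hd.2.2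
    set lo := bBin N 1 hi with hlo
    have hroot : bRoot N 1 = lo + 1 := bRoot_eq_of_bracket hb.1 hb.2.1 hb.2.2
    rw [hroot, PySem.List.pyRange_neg_one_eq_reverse]
    have h01 : (0 : Int) + 1 = 1 := by norm_num
    rw [h01]
    apply pv_items_fold
    rw [List.map_reverse]
    exact List.nodup_reverse.mpr (pv_asc_nodup (lo + 1))

-- ===== VERDICT (by name: the statement is the Claim_ definition above) =====
theorem assembleSet_spec : Claim_equal_assembleSet := by
  intro N _
  unfold Spec_assembleSet
  rw [assembleSet_eq, assembleSet_alt_eq]
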